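-- pv_equiv track=rewrite | github.com/pypi-data/pypi-mirror-401 | packages/sysame/sysame-0.0.17-py3-none-any.whl/sysame/matsim/plan_parser.py | _align_indices
-- ===== SOURCE A (Python) =====
-- from typing import Any, Dict, List, Optional, Tuple, Sequence
--
-- def _align_indices(
--     acts_a: Sequence[str],
--     acts_b: Sequence[str],
--     strategy: str = "index",  # "index" or "by_type"
-- ) -> List[Tuple[int, int]]:
--     pairs: List[Tuple[int, int]] = []
--     if strategy == "index":
--         L = min(len(acts_a), len(acts_b))
--         pairs = [(i, i) for i in range(L)]
--     else:
--         # by_type: match kth occurrence of each type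
--         from collections import defaultdict
--
--         pos_a = defaultdict(list)
--         pos_b = defaultdict(list)
--         for i, t in enumerate(acts_a):
--             pos_a[t].append(i)
--         for j, t in enumerate(acts_b):
--             pos_b[t].append(j)
--         for t in set(pos_a.keys()) & set(pos_b.keys()):
--             L = min(len(pos_a[t]), len(pos_b[t]))
--             pairs.extend((pos_a[t][k], pos_b[t][k]) for k in range(L))
--         pairs.sort()
--     return pairs
-- ===== SOURCE B (Python) =====
-- def _align_indices(
--     acts_a,
--     acts_b,
--     strategy="index",  # "index" or "by_type"
-- ):
--     if strategy == "index":
--         return [(i, i) for i in range(min(len(acts_a), len(acts_b)))]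
--     # by_type: one pass over acts_a with an occurrence counter; no pos_a, no sort
--     # (emitting in increasing a-index already yields the sorted order).
--     pos_b = {}
--     for j, t in enumerate(acts_b):
--         pos_b.setdefault(t, []).append(j)
--     count_a = {}
--     pairs = []
--     for i, t in enumerate(acts_a):
--         k = count_a.get(t, 0)
--         count_a[t] = k + 1
--         bs = pos_b.get(t, [])
--         if k < len(bs):
--             pairs.append((i, bs[k]))
--     return pairs
-- ===== Notes on version B (the rewrite author's own statement) =====
-- stated objective: simpler
-- what changed: The by_type branch replaces A's two per-type position dicts + iteration over the key-set intersection + final sort by a single pass over acts_a with a per-type occurrence counter against one b-position dict, emitting pairs already in increasing (hence sorted) order.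
import Mathlib
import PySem

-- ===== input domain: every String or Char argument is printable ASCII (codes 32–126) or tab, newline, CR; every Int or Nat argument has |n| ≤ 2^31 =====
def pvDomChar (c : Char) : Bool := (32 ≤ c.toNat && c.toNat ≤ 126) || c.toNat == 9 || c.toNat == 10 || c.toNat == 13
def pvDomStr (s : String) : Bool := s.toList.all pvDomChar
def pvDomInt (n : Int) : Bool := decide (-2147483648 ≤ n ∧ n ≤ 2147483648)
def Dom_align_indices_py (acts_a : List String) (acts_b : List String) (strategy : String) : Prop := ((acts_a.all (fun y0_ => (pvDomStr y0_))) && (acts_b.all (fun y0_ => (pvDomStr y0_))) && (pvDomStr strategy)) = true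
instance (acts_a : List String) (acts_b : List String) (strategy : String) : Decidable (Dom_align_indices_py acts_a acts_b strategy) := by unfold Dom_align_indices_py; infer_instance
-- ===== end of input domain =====

-- B replaces A's per-type grouping of both sequences + final sort by a single counter pass over
-- acts_a (emitting pairs already in sorted order); objective: simpler (and no sort).


-- ===== PORT A =====
-- Literal port of _align_indices. Notes on exactness:
--  * pyGetD is used for pos[t][k] only where 0 ≤ k < len (range(min of the lengths)) — a pure totalization guard.
--  * Python iterates 'set(pos_a.keys()) & set(pos_b.keys())' in hash order, which PySem does not model; we iterate
--    in PySem.Set.inter order — sound because the final pairs.sort() (first components all distinct) makes the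
--    result independent of that iteration order.
def align_indices_py (acts_a : List String) (acts_b : List String) (strategy : String) : List (Int × Int) :=
  if strategy == "index" then
    let L : Int := ((min acts_a.length acts_b.length : Nat) : Int)
    (PySem.List.pyRange 0 L 1).map (fun i => (i, i))
  else
    let pos_a := (PySem.List.enumerate acts_a).foldl
      (fun d p => d.modify p.2 [] (fun l => l ++ [p.1])) (PySem.Dict.empty : PySem.Dict String (List Int))
    let pos_b := (PySem.List.enumerate acts_b).foldl
      (fun d p => d.modify p.2 [] (fun l => l ++ [p.1])) (PySem.Dict.empty : PySem.Dict String (List Int))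
    let ts := PySem.Set.inter (PySem.Set.ofList pos_a.keys) (PySem.Set.ofList pos_b.keys)
    let pairs := ts.foldl (fun acc t =>
      let u := pos_a.getD t []
      let v := pos_b.getD t []
      let L : Int := ((min u.length v.length : Nat) : Int)
      acc ++ (PySem.List.pyRange 0 L 1).map
        (fun k => (PySem.List.pyGetD u k 0, PySem.List.pyGetD v k 0))) ([] : List (Int × Int))
    PySem.List.sorted2 pairs (fun p => p.1) (fun p => p.2) false

-- ===== PORT B =====
-- Literal port of Source B (pyGetD: bs[k] only with 0 ≤ k < len(bs), a totalization guard).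
def align_indices_py_alt (acts_a : List String) (acts_b : List String) (strategy : String) : List (Int × Int) :=
  if strategy == "index" then
    (PySem.List.pyRange 0 ((min acts_a.length acts_b.length : Nat) : Int) 1).map (fun i => (i, i))
  else
    let pos_b := (PySem.List.enumerate acts_b).foldl
      (fun d p => d.modify p.2 [] (fun l => l ++ [p.1])) (PySem.Dict.empty : PySem.Dict String (List Int))
    ((PySem.List.enumerate acts_a).foldl
      (fun (st : PySem.Dict String Int × List (Int × Int)) p =>
        let k := st.1.getD p.2 0
        let count_a := st.1.insert p.2 (k + 1)
        let bs := pos_b.getD p.2 []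
        if k < (bs.length : Int) then (count_a, st.2 ++ [(p.1, PySem.List.pyGetD bs k 0)])
        else (count_a, st.2))
      ((PySem.Dict.empty : PySem.Dict String Int), ([] : List (Int × Int)))).2

-- ===== PRECONDITION & SPEC =====
def Spec_align_indices_py (acts_a : List String) (acts_b : List String) (strategy : String) (out : List (Int × Int)) : Prop := out = align_indices_py_alt acts_a acts_b strategy
instance (acts_a : List String) (acts_b : List String) (strategy : String) (out : List (Int × Int)) : Decidable (Spec_align_indices_py acts_a acts_b strategy out) := by unfold Spec_align_indices_py; infer_instance

-- ===== CLAIM (what is proved, stated in full; the proofs are below) =====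
def Claim_equal_align_indices_py : Prop := ∀ (acts_a : List String) (acts_b : List String) (strategy : String), Dom_align_indices_py acts_a acts_b strategy → Spec_align_indices_py acts_a acts_b strategy (align_indices_py acts_a acts_b strategy)

-- ===== LEMMAS AND PROOFS =====

-- indices (as Int) at which t occurs in acts, in increasing order
def occIdx (acts : List String) (t : String) : List Int :=
  ((PySem.List.enumerate acts).filter (fun p => p.2 == t)).map (fun p => p.1)

-- the per-type position dict both ports build, characterised
theorem posGetD (acts : List String) (t : String) :
    ((PySem.List.enumerate acts).foldl
      (fun d p => d.modify p.2 [] (fun l => l ++ [p.1])) (PySem.Dict.empty : PySem.Dict String (List Int))).getD t []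
    = occIdx acts t := by
  have h := List.foldl_map (f := Prod.swap)
    (g := fun (d : PySem.Dict String (List Int)) (p : String × Int) => d.modify p.1 [] (fun l => l ++ [p.2]))
    (l := PySem.List.enumerate acts) (init := (PySem.Dict.empty : PySem.Dict String (List Int)))
  simp only [Prod.fst_swap, Prod.snd_swap] at h
  rw [← h, PySem.Dict.getD_foldl_modify_append]
  simp [occIdx, List.filter_map, List.map_map, Function.comp_def]

theorem posKeys (acts : List String) :
    ((PySem.List.enumerate acts).foldl
      (fun d p => d.modify p.2 [] (fun l => l ++ [p.1])) (PySem.Dict.empty : PySem.Dict String (List Int))).keys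
    = PySem.Set.ofList acts := by
  rw [PySem.Dict.keys_foldl_modify_key (PySem.List.enumerate acts) (fun p => p.2) []
    (fun _ p => (fun l => l ++ [p.1]))]
  simp [PySem.Dict.keys_empty, PySem.Set.update_nil_left, PySem.List.map_snd_enumerate]

theorem occIdx_append (a : List String) (x t : String) :
    occIdx (a ++ [x]) t = occIdx a t ++ (if x == t then [(a.length : Int)] else []) := by
  simp only [occIdx, PySem.List.enumerate_append, PySem.List.enumerate_cons, PySem.List.enumerate_nil,
    List.filter_append, List.map_append, zero_add]
  by_cases h : (x == t) = true <;> simp [h]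

theorem occIdx_length (a : List String) (t : String) :
    (occIdx a t).length = a.count t := by
  induction a using List.reverseRecOn with
  | nil => rfl
  | append_singleton a x ih =>
    rw [occIdx_append, List.count_append]
    by_cases h : (x == t) = true <;> simp [h, ih, List.count_cons]


theorem occIdx_nil_of_not_mem (b : List String) (t : String) (h : t ∉ b) : occIdx b t = [] := by
  simp only [occIdx, List.map_eq_nil_iff, List.filter_eq_nil_iff]
  intro p hp
  rcases (PySem.List.mem_enumerate_iff b 0 p).1 hp with ⟨k, hk, rfl⟩
  simp only [beq_iff_eq]
  intro he; exact h (he ▸ List.getElem_mem hk)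

-- A's inner range/getitem loop is zip
theorem range_getD_eq_zip (u v : List Int) :
    (PySem.List.pyRange 0 ((min u.length v.length : Nat) : Int) 1).map
      (fun k => (PySem.List.pyGetD u k 0, PySem.List.pyGetD v k 0)) = u.zip v := by
  rw [PySem.List.pyRange_zero_natCast, List.map_map]
  apply List.ext_getElem
  · simp [List.length_zip]
  · intro i h1 h2
    simp only [List.length_map, List.length_range] at h1
    simp [Function.comp_def, PySem.List.pyGetD_natCast, List.getElem_zip,
      List.getD_eq_getElem?_getD, List.getElem?_eq_getElem (by omega : i < u.length),
      List.getElem?_eq_getElem (by omega : i < v.length)]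

theorem zip_append_singleton (u v : List Int) (w : Int) :
    (u ++ [w]).zip v = u.zip v ++ (if u.length < v.length then [(w, v.getD u.length 0)] else []) := by
  induction u generalizing v with
  | nil => cases v <;> simp
  | cons c u ih =>
    cases v with
    | nil => simp
    | cons y v => simpa using ih v

-- B's loop: the dict component is the occurrence counter
theorem bloop_fst (l : List (Int × String)) (pos_b : PySem.Dict String (List Int))
    (d : PySem.Dict String Int) (acc : List (Int × Int)) :
    (l.foldl (fun (st : PySem.Dict String Int × List (Int × Int)) p =>
        let k := st.1.getD p.2 0
        let count_a := st.1.insert p.2 (k + 1)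
        let bs := pos_b.getD p.2 []
        if k < (bs.length : Int) then (count_a, st.2 ++ [(p.1, PySem.List.pyGetD bs k 0)])
        else (count_a, st.2)) (d, acc)).1
    = l.foldl (fun d p => d.insert p.2 (d.getD p.2 0 + 1)) d := by
  induction l generalizing d acc with
  | nil => rfl
  | cons p l ih =>
    simp only [List.foldl_cons]
    by_cases hc : d.getD p.2 0 < ((pos_b.getD p.2 []).length : Int) <;>
      simp only [hc, if_pos, ite_false] <;> exact ih _ _

-- B's by_type result, as a function of acts_a only
def bloop (acts_a acts_b : List String) : List (Int × Int) :=
  ((PySem.List.enumerate acts_a).foldl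
    (fun (st : PySem.Dict String Int × List (Int × Int)) p =>
      let k := st.1.getD p.2 0
      let count_a := st.1.insert p.2 (k + 1)
      let bs := ((PySem.List.enumerate acts_b).foldl
        (fun d p => d.modify p.2 [] (fun l => l ++ [p.1])) (PySem.Dict.empty : PySem.Dict String (List Int))).getD p.2 []
      if k < (bs.length : Int) then (count_a, st.2 ++ [(p.1, PySem.List.pyGetD bs k 0)])
      else (count_a, st.2))
    ((PySem.Dict.empty : PySem.Dict String Int), ([] : List (Int × Int)))).2

-- the pair B appends while scanning x after prefix a (nonempty iff the next b-occurrence exists)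
def stepPair (a b : List String) (x : String) : List (Int × Int) :=
  if a.count x < (occIdx b x).length then [((a.length : Int), (occIdx b x).getD (a.count x) 0)] else []

theorem bloop_append (a b : List String) (x : String) :
    bloop (a ++ [x]) b = bloop a b ++ stepPair a b x := by
  have hcnt : ∀ (l : List (Int × String)) (d : PySem.Dict String Int) (t : String),
      (l.foldl (fun d p => d.insert p.2 (d.getD p.2 0 + 1)) d).getD t 0
        = d.getD t 0 + ((l.map (fun p => p.2)).count t : Int) := by
    intro l d t
    rw [← List.foldl_map (f := fun (p : Int × String) => p.2)
      (g := fun (d : PySem.Dict String Int) x => d.insert x (d.getD x 0 + 1))]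
    exact PySem.Dict.getD_foldl_insert_add_one _ d t
  unfold bloop
  rw [PySem.List.enumerate_append, PySem.List.enumerate_cons, PySem.List.enumerate_nil,
    List.foldl_append]
  simp only [List.foldl_cons, List.foldl_nil]
  rw [bloop_fst]
  have h1 : ((PySem.List.enumerate a 0).foldl (fun d p => d.insert p.2 (d.getD p.2 0 + 1))
      (PySem.Dict.empty : PySem.Dict String Int)).getD x 0 = (a.count x : Int) := by
    rw [hcnt]
    simp [PySem.List.map_snd_enumerate, PySem.Dict.getD_empty]
  rw [h1, posGetD, stepPair]
  by_cases hlt : a.count x < (occIdx b x).length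
  · rw [if_pos (by exact_mod_cast hlt), if_pos hlt]
    simp [PySem.List.pyGetD_natCast, zero_add]
  · rw [if_neg (by exact_mod_cast hlt), if_neg hlt, List.append_nil]

def blockOf (a b : List String) (t : String) : List (Int × Int) := (occIdx a t).zip (occIdx b t)

theorem flatMap_update_perm {α β : Type} [DecidableEq α] (S : List α) (f f' : α → List β) (x : α) (e : List β)
    (hnd : S.Nodup) (hx : x ∈ S) (hne : ∀ t ∈ S, t ≠ x → f' t = f t) (hfx : f' x = f x ++ e) :
    (S.flatMap f').Perm (S.flatMap f ++ e) := by
  induction S with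
  | nil => cases hx
  | cons s S ih =>
    rcases List.nodup_cons.1 hnd with ⟨hs, hndS⟩
    simp only [List.flatMap_cons]
    by_cases hsx : s = x
    · subst hsx
      have hfS : S.flatMap f' = S.flatMap f :=
        List.flatMap_congr (fun t ht => hne t (List.mem_cons_of_mem _ ht) (ne_of_mem_of_not_mem ht hs))
      rw [hfS, hfx, List.append_assoc, List.append_assoc]
      exact List.perm_append_comm.append_left (f s)
    · have hxS : x ∈ S := by
        rcases List.mem_cons.1 hx with h | h
        · exact absurd h.symm hsx
        · exact h
      rw [hne s (by simp) hsx, List.append_assoc]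
      exact (ih hndS hxS (fun t ht h2 => hne t (List.mem_cons_of_mem _ ht) h2)).append_left (f s)

theorem main_perm (a b : List String) :
    ((PySem.Set.ofList a).flatMap (blockOf a b)).Perm (bloop a b) := by
  induction a using List.reverseRecOn with
  | nil => simp [bloop, PySem.List.enumerate_nil]
  | append_singleton a x ih =>
    rw [bloop_append, PySem.Set.ofList_append_singleton]
    by_cases hx : x ∈ a
    · have hadd : (PySem.Set.ofList a).add x = PySem.Set.ofList a := by
        simp only [PySem.Set.add]
        rw [if_pos ((PySem.Set.contains_iff (PySem.Set.ofList a) x).2 ((PySem.Set.mem_ofList a x).2 hx))]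
      rw [hadd]
      refine (flatMap_update_perm (PySem.Set.ofList a) (blockOf a b) (blockOf (a ++ [x]) b) x
        (stepPair a b x) (PySem.Set.nodup_ofList a) ((PySem.Set.mem_ofList a x).2 hx) ?_ ?_).trans
        (ih.append_right _)
      · intro t ht hne
        simp only [blockOf, occIdx_append]
        rw [if_neg (fun h => hne (eq_of_beq h).symm), List.append_nil]
      · simp only [blockOf, occIdx_append, if_pos (beq_self_eq_true x)]
        rw [zip_append_singleton]
        unfold stepPair
        simp only [occIdx_length]
    · have hadd : (PySem.Set.ofList a).add x = PySem.Set.ofList a ++ [x] := by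
        simp only [PySem.Set.add]
        rw [if_neg (fun h => hx ((PySem.Set.mem_ofList a x).1
          ((PySem.Set.contains_iff (PySem.Set.ofList a) x).1 h)))]
      have hS : (PySem.Set.ofList a).flatMap (blockOf (a ++ [x]) b)
          = (PySem.Set.ofList a).flatMap (blockOf a b) :=
        List.flatMap_congr (fun t ht => by
          have htx : t ≠ x := fun h => hx (h ▸ (PySem.Set.mem_ofList a t).1 ht)
          simp only [blockOf, occIdx_append]
          rw [if_neg (fun h => htx (eq_of_beq h).symm), List.append_nil])
      have hx2 : blockOf (a ++ [x]) b x = stepPair a b x := by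
        simp only [blockOf, occIdx_append, if_pos (beq_self_eq_true x),
          occIdx_nil_of_not_mem a x hx, List.nil_append]
        rw [show ([(a.length : Int)] : List Int) = ([] : List Int) ++ [(a.length : Int)] from rfl,
          zip_append_singleton]
        simp [stepPair, List.count_eq_zero.2 hx]
      rw [hadd, List.flatMap_append, hS]
      simp only [List.flatMap_cons, List.flatMap_nil, List.append_nil]
      rw [hx2]
      simpa using ih.append_right (stepPair a b x)

theorem bloop_bound (a b : List String) :
    (∀ p ∈ bloop a b, p.1 < (a.length : Int)) ∧ (bloop a b).Pairwise (fun p q => p.1 < q.1) := by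
  have hstep : ∀ (a : List String) (x : String) (q : Int × Int),
      q ∈ stepPair a b x → q.1 = (a.length : Int) := by
    intro a x q hq
    unfold stepPair at hq
    split at hq
    · simp at hq; subst hq; rfl
    · cases hq
  induction a using List.reverseRecOn with
  | nil => constructor <;> simp [bloop, PySem.List.enumerate_nil]
  | append_singleton a x ih =>
    obtain ⟨hb, hp⟩ := ih
    rw [bloop_append]
    constructor
    · intro p hp2
      have hlen : ((a ++ [x]).length : Int) = (a.length : Int) + 1 := by simp
      rcases List.mem_append.1 hp2 with h | h
      · have := hb p h; omega
      · rw [hstep a x p h]; omega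
    · rw [List.pairwise_append]
      refine ⟨hp, ?_, ?_⟩
      · unfold stepPair
        split <;> simp
      · intro p hp1 q hq1
        rw [hstep a x q hq1]
        exact hb p hp1

-- comparator congruence: sorting pairs by the tuple = sorting by the first key when firsts are injective
theorem insertBy_congr {α : Type} (b1 b2 : α → α → Bool) (x : α) (ys : List α)
    (h : ∀ y ∈ ys, b1 x y = b2 x y) : PySem.List.insertBy b1 x ys = PySem.List.insertBy b2 x ys := by
  induction ys with
  | nil => rfl
  | cons y ys ih =>
    simp only [PySem.List.insertBy]
    rw [h y (by simp)]
    by_cases hb : b2 x y = true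
    · simp [hb]
    · simp only [hb, Bool.false_eq_true, if_false]
      rw [ih (fun z hz => h z (by simp [hz]))]

theorem foldl_insertBy_congr {α : Type} (b1 b2 : α → α → Bool) :
    ∀ (xs acc : List α), (∀ p ∈ xs, ∀ q, (q ∈ acc ∨ q ∈ xs) → b1 p q = b2 p q) →
    xs.foldl (fun acc x => PySem.List.insertBy b1 x acc) acc
      = xs.foldl (fun acc x => PySem.List.insertBy b2 x acc) acc := by
  intro xs
  induction xs with
  | nil => intro acc _; rfl
  | cons p xs ih =>
    intro acc h
    simp only [List.foldl_cons]
    rw [insertBy_congr b1 b2 p acc (fun y hy => h p (by simp) y (Or.inl hy))]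
    apply ih
    intro q hq r hr
    apply h q (by simp [hq])
    rcases hr with hr | hr
    · rcases (PySem.List.mem_insertBy b2 p r acc).1 hr with h1 | h1
      · subst h1; exact Or.inr (by simp)
      · exact Or.inl h1
    · exact Or.inr (by simp [hr])

theorem sorted2_eq_sorted_fst (xs : List (Int × Int))
    (hinj : ∀ p ∈ xs, ∀ q ∈ xs, p.1 = q.1 → p = q) :
    PySem.List.sorted2 xs (fun p => p.1) (fun p => p.2) false
      = PySem.List.sorted xs (fun p => p.1) false := by
  rw [PySem.List.sorted_eq_foldl_insertBy]
  unfold PySem.List.sorted2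
  simp only [Bool.false_eq_true, if_false]
  apply foldl_insertBy_congr
  intro p hp q hq
  rcases hq with hq | hq
  · cases hq
  · by_cases h1 : p.1 < q.1
    · simp [h1]
    · by_cases h2 : q.1 < p.1
      · simp [h1, h2]
      · have he : p.1 = q.1 := le_antisymm (not_lt.1 h2) (not_lt.1 h1)
        have hpq := hinj p hp q hq he
        subst hpq
        simp


theorem pairwise_lt_inj {α κ : Type} [LinearOrder κ] (l : List α) (key : α → κ)
    (h : l.Pairwise (fun p q => key p < key q)) : ∀ p ∈ l, ∀ q ∈ l, key p = key q → p = q := by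
  induction l with
  | nil => intro p hp; cases hp
  | cons s l ih =>
    rcases List.pairwise_cons.1 h with ⟨hs, hl⟩
    intro p hp q hq he
    rcases List.mem_cons.1 hp with hp1 | hp1 <;> rcases List.mem_cons.1 hq with hq1 | hq1
    · rw [hp1, hq1]
    · subst hp1; exact absurd he (ne_of_lt (hs q hq1))
    · subst hq1; exact absurd he (ne_of_gt (hs p hp1))
    · exact ih hl p hp1 q hq1 he

theorem flatMap_filter_of_nil {α β : Type} (l : List α) (p : α → Bool) (g : α → List β)
    (h : ∀ t ∈ l, p t = false → g t = []) : (l.filter p).flatMap g = l.flatMap g := by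
  induction l with
  | nil => rfl
  | cons s l ih =>
    rw [List.filter_cons, List.flatMap_cons]
    by_cases hp : p s = true
    · rw [if_pos hp, List.flatMap_cons, ih (fun t ht hf => h t (List.mem_cons_of_mem _ ht) hf)]
    · rw [if_neg (by simpa using hp), h s (by simp) (by simpa using hp), List.nil_append,
        ih (fun t ht hf => h t (List.mem_cons_of_mem _ ht) hf)]

-- ===== VERDICT (by name: the statement is the Claim_ definition above) =====
theorem align_indices_py_spec : Claim_equal_align_indices_py := by
  intro a b s _
  unfold Spec_align_indices_py
  by_cases hs : (s == "index") = true
  · unfold align_indices_py align_indices_py_alt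
    rw [if_pos hs, if_pos hs]
  · unfold align_indices_py align_indices_py_alt
    rw [if_neg hs, if_neg hs]
    dsimp only
    show _ = bloop a b
    conv_lhs =>
      rw [PySem.List.foldl_append_eq_flatMap]
      simp only [List.nil_append, posKeys, posGetD, PySem.Set.ofList_ofList, range_getD_eq_zip]
      rw [show PySem.Set.inter (PySem.Set.ofList a) (PySem.Set.ofList b)
          = (PySem.Set.ofList a).filter (fun t => PySem.Set.contains (PySem.Set.ofList b) t) from rfl]
    rw [flatMap_filter_of_nil _ _ _ (fun t _ hf => by
      have htb : t ∉ b := fun hm => by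
        rw [(PySem.Set.contains_iff (PySem.Set.ofList b) t).2 ((PySem.Set.mem_ofList b t).2 hm)] at hf
        cases hf
      rw [occIdx_nil_of_not_mem b t htb, List.zip_nil_right])]
    have hperm := main_perm a b
    obtain ⟨_, hpw⟩ := bloop_bound a b
    have hinjB := pairwise_lt_inj (bloop a b) (fun p => p.1) hpw
    have hinjX : ∀ p ∈ (PySem.Set.ofList a).flatMap (fun t => (occIdx a t).zip (occIdx b t)),
        ∀ q ∈ (PySem.Set.ofList a).flatMap (fun t => (occIdx a t).zip (occIdx b t)),
        p.1 = q.1 → p = q := fun p hp q hq he =>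
      hinjB p (hperm.subset hp) q (hperm.subset hq) he
    rw [sorted2_eq_sorted_fst _ hinjX]
    exact PySem.List.sorted_eq_of_perm_of_pairwise_lt _ (bloop a b) _ hperm.symm hpw
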